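-- pv_equiv track=rewrite | github.com/TheSilenceOfMind/ai-text-parsing-techniques | src/task_1/custom_tokenizer.py | join_everything_in_quotes
-- ===== SOURCE A (Python) =====
-- quotes = ['\'', '"']
--
-- def join_everything_in_quotes(input_tokens):
--     output = []
--     within_quotes = 0
--     for token in input_tokens:
--         if token in quotes:
--             output.append(token)
--             within_quotes = (within_quotes + 1) % 2
--         else:
--             if not within_quotes:
--                 output.append(token)
--             else:  # are within quotes
--                 if output[-1] in quotes:
--                     output.append(token)
--                 else:
--                     output[-1] += ' ' + token
--     return output
-- ===== SOURCE B (Python) =====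
-- quotes = ['\'', '"']
--
-- def join_everything_in_quotes(input_tokens):
--     output = []
--     buffer = []
--     within_quotes = False
--     for token in input_tokens:
--         if token in quotes:
--             if within_quotes and buffer:
--                 output.append(' '.join(buffer))
--             buffer = []
--             output.append(token)
--             within_quotes = not within_quotes
--         elif within_quotes:
--             buffer.append(token)
--         else:
--             output.append(token)
--     if within_quotes and buffer:
--         output.append(' '.join(buffer))
--     return output
-- ===== Notes on version B (the rewrite author's own statement) =====
-- stated objective: simpler
-- what changed: Replaces repeated in-place string concatenation onto output[-1] (and the output[-1]-is-a-quote test) with a separate buffer list flushed via a single ' '.join at quote boundaries and after the loop.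
import Mathlib
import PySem

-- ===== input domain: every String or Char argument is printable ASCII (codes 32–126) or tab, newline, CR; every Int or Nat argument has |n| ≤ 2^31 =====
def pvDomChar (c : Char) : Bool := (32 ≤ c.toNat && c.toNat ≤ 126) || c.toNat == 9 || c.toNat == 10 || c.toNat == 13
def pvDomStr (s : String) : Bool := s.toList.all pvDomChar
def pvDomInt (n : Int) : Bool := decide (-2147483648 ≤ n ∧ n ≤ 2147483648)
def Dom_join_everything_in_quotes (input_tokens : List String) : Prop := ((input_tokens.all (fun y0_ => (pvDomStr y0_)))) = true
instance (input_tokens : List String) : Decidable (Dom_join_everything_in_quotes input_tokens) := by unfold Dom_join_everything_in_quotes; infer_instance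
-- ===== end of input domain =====

-- B replaces A's in-place concatenation onto output[-1] with a buffer list flushed by one ' '.join (simpler; return value only, no mutation involved).

-- ===== PORT A =====
-- module constant: quotes = ['\'', '"']
def pvQuotes : List String := ["'", "\""]

-- A's loop; output is kept in reverse (append = cons), output[-1] = head.
def joinA_loop : List String → List String → Int → List String
  | [], rev, _ => rev.reverse
  | t :: ts, rev, w =>
    if t ∈ pvQuotes then
      joinA_loop ts (t :: rev) (PySem.Int.mod (w + 1) 2)
    else if w = 0 then
      joinA_loop ts (t :: rev) w
    else
      match rev with
      | [] => joinA_loop ts [t] w  -- unreachable: w ≠ 0 only after a quote was appended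
      | last :: rest =>
        if last ∈ pvQuotes then joinA_loop ts (t :: last :: rest) w
        else joinA_loop ts ((last ++ " " ++ t) :: rest) w

def join_everything_in_quotes (input_tokens : List String) : List String :=
  joinA_loop input_tokens [] 0

-- ===== PORT B =====
-- B's loop; output kept in reverse, buffer kept in order as in Source B.
def joinB_loop : List String → List String → List String → Bool → List String
  | [], rev, buf, within =>
    (if within ∧ buf ≠ [] then PySem.Str.join " " buf :: rev else rev).reverse
  | t :: ts, rev, buf, within =>
    if t ∈ pvQuotes then
      joinB_loop ts (t :: (if within ∧ buf ≠ [] then PySem.Str.join " " buf :: rev else rev)) [] (!within)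
    else if within then
      joinB_loop ts rev (buf ++ [t]) within
    else
      joinB_loop ts (t :: rev) buf within

def join_everything_in_quotes_alt (input_tokens : List String) : List String :=
  joinB_loop input_tokens [] [] false

-- ===== PRECONDITION & SPEC =====
def Spec_join_everything_in_quotes (input_tokens : List String) (out : List String) : Prop := out = join_everything_in_quotes_alt input_tokens
instance (input_tokens : List String) (out : List String) : Decidable (Spec_join_everything_in_quotes input_tokens out) := by unfold Spec_join_everything_in_quotes; infer_instance

-- ===== CLAIM (what is proved, stated in full; the proofs are below) =====
def Claim_equal_join_everything_in_quotes : Prop := ∀ (input_tokens : List String), Dom_join_everything_in_quotes input_tokens → Spec_join_everything_in_quotes input_tokens (join_everything_in_quotes input_tokens)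

-- ===== LEMMAS AND PROOFS =====

-- the flushed output in B when within quotes
def pushJoin (buf rev : List String) : List String :=
  if buf ≠ [] then PySem.Str.join " " buf :: rev else rev

lemma join_singleton_str (t : String) : PySem.Str.join " " [t] = t := by
  simp [PySem.Str.join, PySem.Chars.join_singleton]

lemma join_append_str (buf : List String) (t : String) (h : buf ≠ []) :
    PySem.Str.join " " (buf ++ [t]) = PySem.Str.join " " buf ++ " " ++ t := by
  apply String.toList_injective
  simp [PySem.Str.toList_join]
  induction buf with
  | nil => simp at h
  | cons b bs ih =>
    cases bs with
    | nil => simp [PySem.Chars.join_cons_cons, PySem.Chars.join_singleton]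
    | cons c cs =>
      simp only [List.map_cons, List.cons_append, PySem.Chars.join_cons_cons] at *
      simp [ih]

lemma join_not_quote (buf : List String) (h : buf ≠ [])
    (hq : ∀ x ∈ buf, x ∉ pvQuotes) : PySem.Str.join " " buf ∉ pvQuotes := by
  match buf with
  | [] => exact absurd rfl h
  | [b] =>
    rw [join_singleton_str]
    exact hq b (by simp)
  | b :: c :: cs =>
    intro hmem
    have hsp : ' ' ∈ (PySem.Str.join " " (b :: c :: cs)).toList := by
      simp [PySem.Str.toList_join, PySem.Chars.join_cons_cons]
    simp only [pvQuotes, List.mem_cons, List.not_mem_nil, or_false] at hmem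
    rcases hmem with h' | h' <;> rw [h'] at hsp <;> simp at hsp

lemma main_loop (ts : List String) :
    (∀ rev buf, joinA_loop ts rev 0 = joinB_loop ts rev buf false) ∧
    (∀ rev buf, (∀ x ∈ buf, x ∉ pvQuotes) →
      (buf = [] → ∃ q tl, rev = q :: tl ∧ q ∈ pvQuotes) →
      joinA_loop ts (pushJoin buf rev) 1 = joinB_loop ts rev buf true) := by
  induction ts with
  | nil =>
    constructor
    · intro rev buf; simp [joinA_loop, joinB_loop]
    · intro rev buf _ _
      simp only [joinA_loop, joinB_loop, pushJoin, true_and]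
  | cons t ts ih =>
    have h01 : PySem.Int.mod ((0 : Int) + 1) 2 = 1 := by decide
    have h10 : PySem.Int.mod ((1 : Int) + 1) 2 = 0 := by decide
    constructor
    · intro rev buf
      by_cases ht : t ∈ pvQuotes
      · simp only [joinA_loop, joinB_loop, ht, if_pos, h01, Bool.false_eq_true, false_and,
          if_false, Bool.not_false]
        have := ih.2 (t :: rev) [] (by simp) (fun _ => ⟨t, rev, rfl, ht⟩)
        simpa [pushJoin] using this
      · simp only [joinA_loop, joinB_loop, ht, if_neg, if_pos, Bool.false_eq_true,
          not_false_iff]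
        exact ih.1 (t :: rev) buf
    · intro rev buf hq hbe
      by_cases ht : t ∈ pvQuotes
      · simp only [joinA_loop, joinB_loop, ht, if_pos, h10, Bool.not_true, true_and]
        have heq : (if buf ≠ [] then PySem.Str.join " " buf :: rev else rev) = pushJoin buf rev := rfl
        rw [heq]
        exact ih.1 (t :: pushJoin buf rev) []
      · cases buf with
        | nil =>
          obtain ⟨q, tl, hrev, hqq⟩ := hbe rfl
          subst hrev
          simp only [pushJoin, ne_eq, not_true_eq_false, if_neg, not_false_iff]
          simp only [joinA_loop, joinB_loop, ht, if_neg, not_false_iff]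
          have h1 : ((1 : Int) = 0) = False := by simp
          simp only [h1, if_false, hqq, if_pos]
          have := ih.2 (q :: tl) [t] (by simpa using ht) (by simp)
          simpa [pushJoin, join_singleton_str] using this
        | cons b bs =>
          have hne : b :: bs ≠ [] := by simp
          have hnq : PySem.Str.join " " (b :: bs) ∉ pvQuotes := join_not_quote _ hne hq
          simp only [pushJoin, ne_eq, hne, not_false_iff, if_pos]
          simp only [joinA_loop, joinB_loop, ht, if_neg, not_false_iff]
          have h1 : ((1 : Int) = 0) = False := by simp
          simp only [h1, if_false, hnq]
          have hq' : ∀ x ∈ (b :: bs) ++ [t], x ∉ pvQuotes := by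
            intro x hx
            rcases List.mem_append.mp hx with h' | h'
            · exact hq x h'
            · simp at h'; subst h'; exact ht
          have := ih.2 rev ((b :: bs) ++ [t]) hq' (by simp)
          rw [pushJoin, if_pos (by simp), join_append_str _ _ hne] at this
          exact this

-- ===== VERDICT (by name: the statement is the Claim_ definition above) =====
theorem join_everything_in_quotes_spec : Claim_equal_join_everything_in_quotes := by
  intro input_tokens _
  show _ = _
  unfold join_everything_in_quotes join_everything_in_quotes_alt
  exact (main_loop input_tokens).1 [] []
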